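-- pv_equiv track=rewrite | github.com/bysse/advent-of-code | 2024/python/day24/day24.py | build_gate_tree
-- ===== SOURCE A (Python) =====
-- from collections import deque, defaultdict
--
-- def build_gate_tree(outputs, gates):
--     gate_tree = defaultdict(set)
--
--     def build(node):
--         if node not in gates:
--             return {node}
--         if node in gate_tree:
--             return gate_tree[node]
--         a, op, b = gates[node]
--         gate_tree[node] = build(a) | build(b) | {a, b}
--         return gate_tree[node]
--
--     for output in outputs:
--         build(output)
--
--     return gate_tree
-- ===== SOURCE B (Python) =====
-- from collections import defaultdict
--
-- def build_gate_tree(outputs, gates):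
--     # Iterative post-order DFS with an explicit stack instead of memoized recursion.
--     gate_tree = defaultdict(set)
--
--     def ready(n):
--         return n not in gates or n in gate_tree
--
--     def resolve(n):
--         return gate_tree[n] if n in gates else {n}
--
--     for output in outputs:
--         stack = [output]
--         while stack:
--             node = stack[-1]
--             if ready(node):
--                 stack.pop()
--                 continue
--             a, _, b = gates[node]
--             if ready(a) and ready(b):
--                 gate_tree[node] = resolve(a) | resolve(b) | {a, b}
--                 stack.pop()
--             else:
--                 if not ready(b):
--                     stack.append(b)
--                 if not ready(a):
--                     stack.append(a)
--     return gate_tree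
-- ===== Notes on version B (the rewrite author's own statement) =====
-- stated objective: alternative
-- what changed: Replaces the memoized recursive build() with an iterative post-order DFS over an explicit stack that resolves a gate only once both inputs are leaves or already cached, filling the same defaultdict in the same order (and avoiding Python's recursion limit).
import Mathlib
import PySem

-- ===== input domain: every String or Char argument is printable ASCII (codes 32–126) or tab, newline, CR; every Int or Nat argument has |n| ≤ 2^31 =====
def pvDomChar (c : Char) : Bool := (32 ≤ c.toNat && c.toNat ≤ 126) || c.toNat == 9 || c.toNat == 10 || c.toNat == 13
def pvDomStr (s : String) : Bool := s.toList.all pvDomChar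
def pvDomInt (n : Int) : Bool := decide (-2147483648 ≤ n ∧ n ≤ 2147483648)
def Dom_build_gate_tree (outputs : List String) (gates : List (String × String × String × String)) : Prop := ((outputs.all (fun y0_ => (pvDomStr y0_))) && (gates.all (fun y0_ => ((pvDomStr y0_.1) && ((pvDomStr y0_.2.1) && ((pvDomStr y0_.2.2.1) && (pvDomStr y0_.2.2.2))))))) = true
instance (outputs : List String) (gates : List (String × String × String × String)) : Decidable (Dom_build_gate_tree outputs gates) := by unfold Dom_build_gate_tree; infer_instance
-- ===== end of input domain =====

-- B replaces the memoized recursion by an iterative post-order DFS with an explicit stack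
-- over the same cache dict (objective: alternative decomposition, same cost).

-- ===== PORT A =====
-- literal port of A's memoized recursion; the fuel (gates.length + 1) only guards
-- termination in Lean — under Pre_ (acyclic gate graph) it is proved never to run out
def pvBuildA (G : PySem.Dict String (String × String × String)) :
    Nat → String → PySem.Dict String (List String) →
    Option (List String × PySem.Dict String (List String))
  | 0, _, _ => none
  | f + 1, node, t =>
    match G.get? node with
    | none => some ([node], t)                      -- if node not in gates: return {node}
    | some (a, _, b) =>
      if (t.get? node).isSome then some (t.getD node [], t)   -- if node in gate_tree: return gate_tree[node]
      else
        match pvBuildA G f a t with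
        | none => none
        | some (sa, t1) =>
          match pvBuildA G f b t1 with
          | none => none
          | some (sb, t2) =>
            let s := PySem.Set.union (PySem.Set.union sa sb) (PySem.Set.ofList [a, b])
            some (s, t2.insert node s)              -- gate_tree[node] = build(a) | build(b) | {a, b}

def build_gate_tree (outputs : List String) (gates : List (String × String × String × String)) : List (String × List String) :=
  let G := PySem.Dict.mk gates
  (outputs.foldl (fun t o =>
      match pvBuildA G (gates.length + 1) o t with
      | some (_, t') => t'
      | none => t) PySem.Dict.empty).items

-- ===== PORT B =====
def pvReady (G : PySem.Dict String (String × String × String))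
    (t : PySem.Dict String (List String)) (n : String) : Bool :=
  !G.contains n || t.contains n                     -- n not in gates or n in gate_tree

def pvResolve (G : PySem.Dict String (String × String × String))
    (t : PySem.Dict String (List String)) (n : String) : List String :=
  if G.contains n then t.getD n [] else [n]         -- gate_tree[n] if n in gates else {n}

-- the stack loop; fuel 4^(gates.length+1) is only a termination guard, proved sufficient under Pre_
def pvRunB (G : PySem.Dict String (String × String × String)) :
    Nat → List String → PySem.Dict String (List String) →
    Option (PySem.Dict String (List String))
  | _, [], t => some t                              -- while stack:
  | 0, _ :: _, _ => none
  | m + 1, node :: rest, t =>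
    if pvReady G t node then pvRunB G m rest t      -- if ready(node): stack.pop()
    else
      match G.get? node with
      | none => none                                -- unreachable: ready covers leaves
      | some (a, _, b) =>
        if pvReady G t a && pvReady G t b then
          pvRunB G m rest
            (t.insert node (PySem.Set.union (PySem.Set.union (pvResolve G t a) (pvResolve G t b)) (PySem.Set.ofList [a, b])))
        else
          pvRunB G m ((if pvReady G t a then [] else [a]) ++ (if pvReady G t b then [] else [b]) ++ node :: rest) t

def build_gate_tree_alt (outputs : List String) (gates : List (String × String × String × String)) : List (String × List String) :=
  let G := PySem.Dict.mk gates
  (outputs.foldl (fun t o => (pvRunB G (4 ^ (gates.length + 1)) [o] t).getD t) PySem.Dict.empty).items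

-- ===== PRECONDITION & SPEC =====
def pvSucc (G : PySem.Dict String (String × String × String)) (n : String) : List String :=
  match G.get? n with
  | some (a, _, b) => [a, b]
  | none => []

-- pvReach G n x y: there is a directed path of length ≤ n from x to y along gate inputs
def pvReach (G : PySem.Dict String (String × String × String)) : Nat → String → String → Bool
  | 0, x, y => x == y
  | n + 1, x, y => x == y || (pvSucc G x).any (fun c => pvReach G n c y)

-- Pre_ excludes exactly the inputs on which some gate key reachable from an output lies on a
-- directed cycle: there A's unbounded recursion raises RecursionError. (The bounded reach
-- depths are exact: a minimal path/cycle passes each gate key at most once.)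
def Pre_build_gate_tree (outputs : List String) (gates : List (String × String × String × String)) : Prop :=
  ((gates.map Prod.fst).all (fun k =>
    !(outputs.any (fun o => pvReach (PySem.Dict.mk gates) (2 * gates.length + 4) o k)) ||
    !((pvSucc (PySem.Dict.mk gates) k).any (fun c => pvReach (PySem.Dict.mk gates) (gates.length + 1) c k)))) = true

instance (outputs : List String) (gates : List (String × String × String × String)) : Decidable (Pre_build_gate_tree outputs gates) := by unfold Pre_build_gate_tree; infer_instance

def pvWitness_build_gate_tree : List String × (List (String × String × String × String)) :=
  (["z0"], [("z0", "x", "AND", "y")])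

def Spec_build_gate_tree (outputs : List String) (gates : List (String × String × String × String)) (out : List (String × List String)) : Prop := out = build_gate_tree_alt outputs gates
instance (outputs : List String) (gates : List (String × String × String × String)) (out : List (String × List String)) : Decidable (Spec_build_gate_tree outputs gates out) := by unfold Spec_build_gate_tree; infer_instance

-- ===== CLAIM (what is proved, stated in full; the proofs are below) =====
def Claim_equal_build_gate_tree : Prop := ∀ (outputs : List String) (gates : List (String × String × String × String)), Dom_build_gate_tree outputs gates → Pre_build_gate_tree outputs gates → Spec_build_gate_tree outputs gates (build_gate_tree outputs gates)

-- ===== LEMMAS AND PROOFS =====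

theorem pvReach_refl (G : PySem.Dict String (String × String × String)) (n : Nat) (x : String) :
    pvReach G n x x = true := by
  cases n <;> simp [pvReach]

theorem pvReach_mono (G : PySem.Dict String (String × String × String)) {n m : Nat} (h : n ≤ m)
    {x y : String} (hr : pvReach G n x y = true) : pvReach G m x y = true := by
  induction n generalizing m x y with
  | zero =>
    simp [pvReach] at hr
    subst hr; exact pvReach_refl G m x
  | succ k ih =>
    obtain ⟨m', rfl⟩ : ∃ m', m = m' + 1 := ⟨m - 1, by omega⟩
    simp [pvReach, List.any_eq_true] at hr ⊢
    rcases hr with h1 | ⟨c, hc, hrc⟩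
    · exact Or.inl h1
    · exact Or.inr ⟨c, hc, ih (by omega) hrc⟩

theorem pvReach_step (G : PySem.Dict String (String × String × String)) {n : Nat} {x c y : String}
    (hc : c ∈ pvSucc G x) (hr : pvReach G n c y = true) : pvReach G (n + 1) x y = true := by
  simp [pvReach, List.any_eq_true]
  exact Or.inr ⟨c, hc, hr⟩

theorem pvReach_snoc (G : PySem.Dict String (String × String × String)) :
    ∀ {n : Nat} {o x c : String}, pvReach G n o x = true → c ∈ pvSucc G x →
      pvReach G (n + 1) o c = true := by
  intro n
  induction n with
  | zero =>
    intro o x c h hc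
    simp [pvReach] at h
    subst h
    exact pvReach_step G hc (by simp [pvReach])
  | succ k ih =>
    intro o x c h hc
    simp only [pvReach, Bool.or_eq_true, List.any_eq_true] at h
    rcases h with h | ⟨w, hw, hrw⟩
    · simp at h
      subst h
      exact pvReach_step G hc (pvReach_refl G _ c)
    · exact pvReach_step G hw (ih hrw hc)

theorem pv_mem_keys_of_get? (gates : List (String × String × String × String)) (node : String)
    (v : String × String × String) (h : (PySem.Dict.mk gates).get? node = some v) :
    node ∈ gates.map Prod.fst := by
  induction gates with
  | nil => simp [show PySem.Dict.mk ([] : List (String × String × String × String)) = PySem.Dict.empty from rfl, PySem.Dict.get?_empty] at h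
  | cons p rest ih =>
    rw [show PySem.Dict.mk (p :: rest) = PySem.Dict.mk ((p.1, p.2) :: rest) from rfl] at h
    rw [PySem.Dict.get?_mk_cons] at h
    by_cases hb : p.1 == node
    · simp_all
    · simp [hb] at h
      exact List.mem_cons_of_mem _ (ih h)

-- Pre_ specialized: no child of a gate key reaches back to it within any n ≤ gates.length + 1
theorem pv_pre_no_cycle (outputs : List String) (gates : List (String × String × String × String))
    (hPre : Pre_build_gate_tree outputs gates) {node c : String}
    (hk : node ∈ gates.map Prod.fst) (hc : c ∈ pvSucc (PySem.Dict.mk gates) node)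
    {o : String} (ho : o ∈ outputs) {n0 : Nat}
    (hro : pvReach (PySem.Dict.mk gates) n0 o node = true) (hn0 : n0 ≤ 2 * gates.length + 4)
    {n : Nat} (hn : n ≤ gates.length + 1) :
    pvReach (PySem.Dict.mk gates) n c node = false := by
  unfold Pre_build_gate_tree at hPre
  simp only [List.all_eq_true, Bool.or_eq_true, Bool.not_eq_true', List.any_eq_false] at hPre
  rcases hPre node hk with hout | hcyc
  · exact absurd (pvReach_mono _ hn0 hro) (by simp [hout o ho])
  · by_contra hcon
    rw [Bool.not_eq_false] at hcon
    exact absurd (pvReach_mono _ hn hcon) (by simp [hcyc c hc])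

-- buildA only ever adds keys: existing cache entries survive unchanged
theorem pvBuildA_pres (G : PySem.Dict String (String × String × String)) :
    ∀ (f : Nat) (node : String) (t s t'),
      pvBuildA G f node t = some (s, t') →
      ∀ k v, t.get? k = some v → t'.get? k = some v := by
  intro f
  induction f with
  | zero => intro node t s t' h; simp [pvBuildA] at h
  | succ f ih =>
    intro node t s t' h k v hk
    rw [pvBuildA] at h
    cases hg : G.get? node with
    | none =>
      rw [hg] at h
      simp at h
      obtain ⟨-, rfl⟩ := h
      exact hk
    | some val =>
      obtain ⟨a, op, b⟩ := val
      rw [hg] at h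
      by_cases hc : (t.get? node).isSome
      · simp [hc] at h
        obtain ⟨-, rfl⟩ := h
        exact hk
      · simp [hc] at h
        cases h1 : pvBuildA G f a t with
        | none => rw [h1] at h; simp at h
        | some p1 =>
          obtain ⟨sa, t1⟩ := p1
          rw [h1] at h
          dsimp only [] at h
          cases h2 : pvBuildA G f b t1 with
          | none => rw [h2] at h; simp at h
          | some p2 =>
            obtain ⟨sb, t2⟩ := p2
            rw [h2] at h
            dsimp only [] at h
            simp at h
            obtain ⟨-, rfl⟩ := h
            have hk2 := ih _ _ _ _ h2 k v (ih _ _ _ _ h1 k v hk)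
            have hne : k ≠ node := by intro e; subst e; rw [hk] at hc; simp at hc
            rw [PySem.Dict.get?_insert, if_neg hne]
            exact hk2

-- every key added by buildA is reachable from the call's node within the fuel
theorem pvBuildA_dom (G : PySem.Dict String (String × String × String)) :
    ∀ (f : Nat) (node : String) (t s t'),
      pvBuildA G f node t = some (s, t') →
      ∀ k, ((t'.get? k).isSome = true) → ((t.get? k).isSome = true) ∨ pvReach G f node k = true := by
  intro f
  induction f with
  | zero => intro node t s t' h; simp [pvBuildA] at h
  | succ f ih =>
    intro node t s t' h k hk
    rw [pvBuildA] at h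
    cases hg : G.get? node with
    | none =>
      rw [hg] at h; simp at h
      obtain ⟨-, rfl⟩ := h
      exact Or.inl hk
    | some val =>
      obtain ⟨a, op, b⟩ := val
      rw [hg] at h
      by_cases hc : (t.get? node).isSome
      · simp [hc] at h
        obtain ⟨-, rfl⟩ := h
        exact Or.inl hk
      · simp [hc] at h
        cases h1 : pvBuildA G f a t with
        | none => rw [h1] at h; simp at h
        | some p1 =>
          obtain ⟨sa, t1⟩ := p1
          rw [h1] at h
          dsimp only [] at h
          cases h2 : pvBuildA G f b t1 with
          | none => rw [h2] at h; simp at h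
          | some p2 =>
            obtain ⟨sb, t2⟩ := p2
            rw [h2] at h
            dsimp only [] at h
            simp at h
            obtain ⟨-, rfl⟩ := h
            by_cases hkn : k = node
            · subst hkn; exact Or.inr (pvReach_refl G _ k)
            · rw [PySem.Dict.get?_insert, if_neg hkn] at hk
              have hsucc : a ∈ pvSucc G node ∧ b ∈ pvSucc G node := by
                simp [pvSucc, hg]
              rcases ih _ _ _ _ h2 k hk with hk1 | hr
              · rcases ih _ _ _ _ h1 k hk1 with hk0 | hr
                · exact Or.inl hk0
                · exact Or.inr (pvReach_step G hsucc.1 hr)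
              · exact Or.inr (pvReach_step G hsucc.2 hr)

theorem pvBuildA_ready (G : PySem.Dict String (String × String × String))
    (f : Nat) (node : String) (t : PySem.Dict String (List String))
    (h : pvReady G t node = true) :
    pvBuildA G (f + 1) node t = some (pvResolve G t node, t) := by
  rw [pvBuildA]
  unfold pvReady at h
  cases hg : G.get? node with
  | none =>
    simp [pvResolve, PySem.Dict.contains_eq_isSome_get?, hg]
  | some val =>
    obtain ⟨a, op, b⟩ := val
    rw [PySem.Dict.contains_eq_isSome_get?, PySem.Dict.contains_eq_isSome_get?, hg] at h
    simp at h
    simp [h, pvResolve, PySem.Dict.contains_eq_isSome_get?, hg]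

-- an uncached gate is cached with its computed set after a successful call
theorem pvBuildA_caches (G : PySem.Dict String (String × String × String))
    (f : Nat) (node : String) (t s t')
    (h : pvBuildA G f node t = some (s, t'))
    (hg : (G.get? node).isSome = true) (hu : (t.get? node).isSome = false) :
    t'.get? node = some s := by
  cases f with
  | zero => simp [pvBuildA] at h
  | succ f =>
    rw [pvBuildA] at h
    cases hgn : G.get? node with
    | none => rw [hgn] at hg; simp at hg
    | some val =>
      obtain ⟨a, op, b⟩ := val
      rw [hgn] at h
      rw [hu] at h
      simp only [Bool.false_eq_true, if_false] at h
      cases h1 : pvBuildA G f a t with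
      | none => rw [h1] at h; simp at h
      | some p1 =>
        obtain ⟨sa, t1⟩ := p1
        rw [h1] at h
        dsimp only [] at h
        cases h2 : pvBuildA G f b t1 with
        | none => rw [h2] at h; simp at h
        | some p2 =>
          obtain ⟨sb, t2⟩ := p2
          rw [h2] at h
          dsimp only [] at h
          simp at h
          obtain ⟨hs, rfl⟩ := h
          rw [PySem.Dict.get?_insert_self, hs]

theorem pvRunB_mono (G : PySem.Dict String (String × String × String)) :
    ∀ (m : Nat) (st : List String) (t d), pvRunB G m st t = some d →
      ∀ k, pvRunB G (m + k) st t = some d := by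
  intro m
  induction m with
  | zero =>
    intro st t d h k
    cases st with
    | nil => simpa [pvRunB] using h
    | cons node rest => simp [pvRunB] at h
  | succ m ih =>
    intro st t d h k
    cases st with
    | nil => simpa [pvRunB] using h
    | cons node rest =>
      rw [pvRunB] at h
      rw [show m + 1 + k = (m + k) + 1 from by omega, pvRunB]
      by_cases hr : pvReady G t node
      · simp only [hr, if_true] at h ⊢
        exact ih _ _ _ h k
      · simp only [hr, if_false, Bool.false_eq_true] at h ⊢
        cases hg : G.get? node with
        | none => simp [hg] at h
        | some val =>
          obtain ⟨a, op, b⟩ := val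
          simp only [hg] at h
          dsimp only [] at h ⊢
          by_cases hab : pvReady G t a && pvReady G t b
          · simp only [hab, if_true] at h ⊢
            exact ih _ _ _ h k
          · simp only [hab, if_false, Bool.false_eq_true] at h ⊢
            exact ih _ _ _ h k

-- uncached gate keys reachable from `node` within n steps
def pvUnc (gates : List (String × String × String × String)) (n : Nat)
    (t : PySem.Dict String (List String)) (node : String) : Finset String :=
  (gates.map Prod.fst).toFinset.filter
    (fun k => ((t.get? k).isSome = false) ∧ pvReach (PySem.Dict.mk gates) n node k = true)

theorem pvUnc_ssubset (outputs : List String) (gates : List (String × String × String × String))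
    (hPre : Pre_build_gate_tree outputs gates) {g : Nat}
    {t t2 : PySem.Dict String (List String)} {node c : String}
    (hnk : node ∈ gates.map Prod.fst)
    (hun : (t.get? node).isSome = false)
    (hc : c ∈ pvSucc (PySem.Dict.mk gates) node)
    {o : String} (ho : o ∈ outputs) {n0 : Nat}
    (hro : pvReach (PySem.Dict.mk gates) n0 o node = true) (hn0 : n0 ≤ 2 * gates.length + 4)
    (hg : g + 2 ≤ gates.length + 3)
    (hmono : ∀ k, ((t2.get? k).isSome = false) → ((t.get? k).isSome = false)) :
    pvUnc gates g t2 c ⊂ pvUnc gates (g + 1) t node := by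
  have hss : pvUnc gates g t2 c ⊆ pvUnc gates (g + 1) t node := by
    intro k hk
    unfold pvUnc at hk ⊢
    simp only [Finset.mem_filter, List.mem_toFinset] at hk ⊢
    exact ⟨hk.1, hmono k hk.2.1, pvReach_step _ hc hk.2.2⟩
  rw [Finset.ssubset_iff_of_subset hss]
  refine ⟨node, ?_, ?_⟩
  · unfold pvUnc
    simp only [Finset.mem_filter, List.mem_toFinset]
    exact ⟨hnk, hun, pvReach_refl _ _ _⟩
  · intro hmem
    unfold pvUnc at hmem
    simp only [Finset.mem_filter, List.mem_toFinset] at hmem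
    have hfalse := pv_pre_no_cycle outputs gates hPre hnk hc ho hro hn0 (n := g) (by omega)
    rw [hfalse] at hmem
    simp at hmem

theorem pvTransport (G : PySem.Dict String (String × String × String))
    {tA tB : PySem.Dict String (List String)}
    (hp : ∀ k v, tA.get? k = some v → tB.get? k = some v) {x : String}
    (h : pvReady G tA x = true) :
    pvReady G tB x = true ∧ pvResolve G tB x = pvResolve G tA x := by
  by_cases hgx : G.contains x = true
  · have hx : (tA.get? x).isSome = true := by
      simp [pvReady, hgx] at h
      rwa [PySem.Dict.contains_eq_isSome_get?] at h
    obtain ⟨v, hv⟩ := Option.isSome_iff_exists.mp hx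
    have hv2 := hp x v hv
    constructor
    · simp [pvReady, PySem.Dict.contains_eq_isSome_get?, hv2]
    · simp [pvResolve, hgx, PySem.Dict.getD_eq_get?_getD, hv, hv2]
  · constructor
    · simp [pvReady, hgx]
    · simp [pvResolve, hgx]

theorem pvResReady (G : PySem.Dict String (String × String × String))
    {f : Nat} {x : String} {t : PySem.Dict String (List String)}
    {sx : List String} {tx : PySem.Dict String (List String)}
    (h : pvBuildA G (f + 1) x t = some (sx, tx)) :
    pvReady G tx x = true ∧ pvResolve G tx x = sx ∧ (pvReady G t x = true → tx = t) := by
  by_cases hr : pvReady G t x = true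
  · have h2 := pvBuildA_ready G f x t hr
    rw [h] at h2
    simp only [Option.some.injEq, Prod.mk.injEq] at h2
    obtain ⟨hsx, htx⟩ := h2
    subst htx
    exact ⟨hr, hsx.symm ▸ rfl, fun _ => rfl⟩
  · have hcomp : G.contains x = true ∧ t.contains x = false := by
      have := hr; simp [pvReady] at this; exact this
    have hcx : tx.get? x = some sx :=
      pvBuildA_caches G (f + 1) x t sx tx h
        (by rw [← PySem.Dict.contains_eq_isSome_get?]; exact hcomp.1)
        (by rw [← PySem.Dict.contains_eq_isSome_get?]; simp [hcomp.2])
    refine ⟨?_, ?_, fun hc => absurd hc hr⟩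
    · simp [pvReady, PySem.Dict.contains_eq_isSome_get?, hcx]
    · simp [pvResolve, hcomp.1, PySem.Dict.getD_eq_get?_getD, hcx]

-- fuel sufficiency: with acyclicity, fuel bounded by the number of uncached reachable keys suffices
theorem pvBuildA_total (outputs : List String) (gates : List (String × String × String × String))
    (hPre : Pre_build_gate_tree outputs gates) :
    ∀ (g : Nat) (t : PySem.Dict String (List String)) (node o : String) (n0 : Nat),
      o ∈ outputs → pvReach (PySem.Dict.mk gates) n0 o node = true →
      n0 + g + 1 ≤ 2 * gates.length + 4 →
      g + 1 ≤ gates.length + 3 → (pvUnc gates g t node).card ≤ g →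
      (pvBuildA (PySem.Dict.mk gates) (g + 1) node t).isSome = true := by
  intro g
  induction g with
  | zero =>
    intro t node o n0 ho hro hb0 hb hc
    rw [pvBuildA]
    cases hg : (PySem.Dict.mk gates).get? node with
    | none => simp
    | some val =>
      obtain ⟨a, op, b⟩ := val
      by_cases hcn : (t.get? node).isSome
      · simp [hcn]
      · exfalso
        have hmem : node ∈ pvUnc gates 0 t node := by
          unfold pvUnc
          simp only [Finset.mem_filter, List.mem_toFinset]
          exact ⟨pv_mem_keys_of_get? gates node _ hg, by simpa using hcn, pvReach_refl _ _ _⟩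
        have := Finset.card_pos.mpr ⟨node, hmem⟩
        omega
  | succ g ih =>
    intro t node o n0 ho hro hb0 hb hc
    rw [pvBuildA]
    cases hg : (PySem.Dict.mk gates).get? node with
    | none => simp
    | some val =>
      obtain ⟨a, op, b⟩ := val
      by_cases hcn : (t.get? node).isSome
      · simp [hcn]
      · simp only [hcn, Bool.false_eq_true, if_false]
        have hnk : node ∈ gates.map Prod.fst := pv_mem_keys_of_get? gates node _ hg
        have hun : (t.get? node).isSome = false := by simpa using hcn
        have hsucca : a ∈ pvSucc (PySem.Dict.mk gates) node := by simp [pvSucc, hg]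
        have hsuccb : b ∈ pvSucc (PySem.Dict.mk gates) node := by simp [pvSucc, hg]
        have hroa : pvReach (PySem.Dict.mk gates) (n0 + 1) o a = true := pvReach_snoc _ hro hsucca
        have hrob : pvReach (PySem.Dict.mk gates) (n0 + 1) o b = true := pvReach_snoc _ hro hsuccb
        have hssA : pvUnc gates g t a ⊂ pvUnc gates (g + 1) t node :=
          pvUnc_ssubset outputs gates hPre hnk hun hsucca ho hro (by omega) (by omega) (fun k hk => hk)
        have hA : (pvBuildA (PySem.Dict.mk gates) (g + 1) a t).isSome = true := by
          apply ih t a o (n0 + 1) ho hroa (by omega) (by omega)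
          have := Finset.card_lt_card hssA
          omega
        obtain ⟨⟨sa, t1⟩, h1⟩ := Option.isSome_iff_exists.mp hA
        have hmono1 : ∀ k, ((t1.get? k).isSome = false) → ((t.get? k).isSome = false) := by
          intro k hk
          by_contra hcon
          rw [Bool.not_eq_false] at hcon
          obtain ⟨v, hv⟩ := Option.isSome_iff_exists.mp hcon
          have := pvBuildA_pres (PySem.Dict.mk gates) _ _ _ _ _ h1 k v hv
          rw [this] at hk; simp at hk
        have hssB : pvUnc gates g t1 b ⊂ pvUnc gates (g + 1) t node :=
          pvUnc_ssubset outputs gates hPre hnk hun hsuccb ho hro (by omega) (by omega) hmono1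
        have hB : (pvBuildA (PySem.Dict.mk gates) (g + 1) b t1).isSome = true := by
          apply ih t1 b o (n0 + 1) ho hrob (by omega) (by omega)
          have := Finset.card_lt_card hssB
          omega
        obtain ⟨⟨sb, t2⟩, h2⟩ := Option.isSome_iff_exists.mp hB
        rw [h1]
        dsimp only []
        rw [h2]
        simp

-- simulation: one successful recursive call of A corresponds to clearing `node` off B's stack
theorem pvSim (outputs : List String) (gates : List (String × String × String × String))
    (hPre : Pre_build_gate_tree outputs gates) :
    ∀ (f : Nat), f ≤ gates.length + 2 →
    ∀ (node o : String) (n0 : Nat), o ∈ outputs → pvReach (PySem.Dict.mk gates) n0 o node = true →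
      n0 + f ≤ 2 * gates.length + 4 →
    ∀ (t s t'), pvBuildA (PySem.Dict.mk gates) f node t = some (s, t') →
    ∀ (rest : List String) (m : Nat) (d), pvRunB (PySem.Dict.mk gates) m rest t' = some d →
      pvRunB (PySem.Dict.mk gates) (m + 4 ^ f) (node :: rest) t = some d := by
  intro f
  induction f with
  | zero => intro _ node o n0 _ _ _ t s t' h; simp [pvBuildA] at h
  | succ f ih =>
    intro hf node o n0 ho hro hn0 t s t' h rest m d hrun
    have hX : 1 ≤ 4 ^ f := Nat.one_le_pow _ _ (by omega)
    have hX1 : 1 ≤ 4 ^ (f + 1) := Nat.one_le_pow _ _ (by omega)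
    rw [pvBuildA] at h
    cases hg : (PySem.Dict.mk gates).get? node with
    | none =>
      rw [hg] at h
      simp only [Option.some.injEq, Prod.mk.injEq] at h
      obtain ⟨-, rfl⟩ := h
      have hready : pvReady (PySem.Dict.mk gates) t node = true := by
        simp [pvReady, PySem.Dict.contains_eq_isSome_get?, hg]
      obtain ⟨M, hM1, hM2⟩ : ∃ M, m + 4 ^ (f + 1) = M + 1 ∧ m ≤ M :=
        ⟨m + 4 ^ (f + 1) - 1, by omega, by omega⟩
      rw [hM1, pvRunB]
      simp only [hready, if_true]
      have := pvRunB_mono (PySem.Dict.mk gates) m rest t d hrun (M - m)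
      rwa [show m + (M - m) = M from by omega] at this
    | some val =>
      obtain ⟨a, op, b⟩ := val
      rw [hg] at h
      by_cases hcn : (t.get? node).isSome
      · simp only [hcn, if_true, Option.some.injEq, Prod.mk.injEq] at h
        obtain ⟨-, rfl⟩ := h
        have hready : pvReady (PySem.Dict.mk gates) t node = true := by
          simp [pvReady, PySem.Dict.contains_eq_isSome_get?, hcn]
        obtain ⟨M, hM1, hM2⟩ : ∃ M, m + 4 ^ (f + 1) = M + 1 ∧ m ≤ M :=
          ⟨m + 4 ^ (f + 1) - 1, by omega, by omega⟩
        rw [hM1, pvRunB]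
        simp only [hready, if_true]
        have := pvRunB_mono (PySem.Dict.mk gates) m rest t d hrun (M - m)
        rwa [show m + (M - m) = M from by omega] at this
      · simp only [hcn, Bool.false_eq_true, if_false] at h
        cases h1 : pvBuildA (PySem.Dict.mk gates) f a t with
        | none => rw [h1] at h; simp at h
        | some p1 =>
          obtain ⟨sa, t1⟩ := p1
          rw [h1] at h
          dsimp only [] at h
          cases h2 : pvBuildA (PySem.Dict.mk gates) f b t1 with
          | none => rw [h2] at h; simp at h
          | some p2 =>
            obtain ⟨sb, t2⟩ := p2
            rw [h2] at h
            dsimp only [] at h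
            simp only [Option.some.injEq, Prod.mk.injEq] at h
            obtain ⟨hs, ht'⟩ := h
            rw [hs] at ht'
            obtain ⟨f0, rfl⟩ : ∃ f0, f = f0 + 1 := by
              cases f with
              | zero => simp [pvBuildA] at h1
              | succ f0 => exact ⟨f0, rfl⟩
            have hf' : f0 + 1 ≤ gates.length + 2 := by omega
            have hnk : node ∈ gates.map Prod.fst := pv_mem_keys_of_get? gates node _ hg
            have hsucca : a ∈ pvSucc (PySem.Dict.mk gates) node := by simp [pvSucc, hg]
            have hsuccb : b ∈ pvSucc (PySem.Dict.mk gates) node := by simp [pvSucc, hg]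
            have noreach : ∀ c ∈ pvSucc (PySem.Dict.mk gates) node,
                pvReach (PySem.Dict.mk gates) (f0 + 1) c node = false :=
              fun c hc => pv_pre_no_cycle outputs gates hPre hnk hc ho hro (by omega) (by omega)
            have hroa : pvReach (PySem.Dict.mk gates) (n0 + 1) o a = true := pvReach_snoc _ hro hsucca
            have hrob : pvReach (PySem.Dict.mk gates) (n0 + 1) o b = true := pvReach_snoc _ hro hsuccb
            have hpres1 := pvBuildA_pres (PySem.Dict.mk gates) _ _ _ _ _ h1
            have hpres2 := pvBuildA_pres (PySem.Dict.mk gates) _ _ _ _ _ h2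
            -- node stays uncached through both child calls
            have hn2 : (t2.get? node).isSome = false := by
              by_contra hcon
              rw [Bool.not_eq_false] at hcon
              rcases pvBuildA_dom (PySem.Dict.mk gates) _ _ _ _ _ h2 node hcon with h' | hr
              · rcases pvBuildA_dom (PySem.Dict.mk gates) _ _ _ _ _ h1 node h' with h'' | hr
                · exact hcn h''
                · rw [noreach a hsucca] at hr; simp at hr
              · rw [noreach b hsuccb] at hr; simp at hr
            have hra1 := pvResReady (PySem.Dict.mk gates) h1
            have hrb2 := pvResReady (PySem.Dict.mk gates) h2
            have hra2 : pvReady (PySem.Dict.mk gates) t2 a = true ∧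
                pvResolve (PySem.Dict.mk gates) t2 a = sa := by
              obtain ⟨hrdy, hres⟩ := pvTransport (PySem.Dict.mk gates) hpres2 hra1.1
              exact ⟨hrdy, by rw [hres, hra1.2.1]⟩
            have hnr2 : pvReady (PySem.Dict.mk gates) t2 node = false := by
              simp [pvReady, PySem.Dict.contains_eq_isSome_get?, hg, hn2]
            -- the revisit of node, with both inputs available, performs A's insertion
            have hrev : pvRunB (PySem.Dict.mk gates) (m + 1) (node :: rest) t2 = some d := by
              rw [pvRunB]
              simp only [hnr2, Bool.false_eq_true, if_false]
              rw [hg]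
              dsimp only []
              simp only [hra2.1, hrb2.1, Bool.and_self, if_true]
              rw [hra2.2, hrb2.2.1, hs, ht']
              exact hrun
            by_cases hboth : (pvReady (PySem.Dict.mk gates) t a && pvReady (PySem.Dict.mk gates) t b) = true
            · -- both inputs already available: the machine computes at once
              rw [Bool.and_eq_true] at hboth
              have ht1 : t1 = t := hra1.2.2 hboth.1
              have hrb1 : pvReady (PySem.Dict.mk gates) t1 b = true := by rw [ht1]; exact hboth.2
              have ht2 : t2 = t1 := hrb2.2.2 hrb1
              have hrev' : pvRunB (PySem.Dict.mk gates) (m + 1) (node :: rest) t = some d := by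
                rw [← ht1, ← ht2]; exact hrev
              have := pvRunB_mono (PySem.Dict.mk gates) (m + 1) (node :: rest) t d hrev' (4 ^ (f0 + 2) - 1)
              rwa [show m + 1 + (4 ^ (f0 + 2) - 1) = m + 4 ^ (f0 + 2) from by
                have : 1 ≤ 4 ^ (f0 + 2) := Nat.one_le_pow _ _ (by omega)
                omega] at this
            · -- at least one input missing: the machine pushes it/them and recurses
              have hab : (pvReady (PySem.Dict.mk gates) t a && pvReady (PySem.Dict.mk gates) t b) = false :=
                Bool.eq_false_iff.mpr hboth
              have hstack : ∀ M st, pvRunB (PySem.Dict.mk gates) M st t = some d →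
                  st = ((if pvReady (PySem.Dict.mk gates) t a = true then [] else [a]) ++
                        (if pvReady (PySem.Dict.mk gates) t b = true then [] else [b]) ++ node :: rest) →
                  M + 1 ≤ m + 4 ^ (f0 + 2) →
                  pvRunB (PySem.Dict.mk gates) (m + 4 ^ (f0 + 2)) (node :: rest) t = some d := by
                intro M st hM hst hle
                obtain ⟨K, hK⟩ : ∃ K, m + 4 ^ (f0 + 2) = (M + K) + 1 := ⟨m + 4 ^ (f0 + 2) - M - 1, by omega⟩
                rw [hK, pvRunB]
                have hnrt : pvReady (PySem.Dict.mk gates) t node = false := by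
                  simp [pvReady, PySem.Dict.contains_eq_isSome_get?, hg, hcn]
                simp only [hnrt, Bool.false_eq_true, if_false]
                rw [hg]
                dsimp only []
                simp only [hab, Bool.false_eq_true, if_false]
                rw [← hst]
                exact pvRunB_mono (PySem.Dict.mk gates) M st t d hM K
              by_cases hrta : pvReady (PySem.Dict.mk gates) t a = true
              · -- only b is missing
                have hrtb : pvReady (PySem.Dict.mk gates) t b = false := by
                  rcases Bool.eq_false_or_eq_true (pvReady (PySem.Dict.mk gates) t b) with h' | h'
                  · rw [hrta, h'] at hab; simp at hab
                  · exact h'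
                have ht1 : t1 = t := hra1.2.2 hrta
                have hB := ih hf' b o (n0 + 1) ho hrob (by omega) t1 sb t2 h2 (node :: rest) (m + 1) d hrev
                rw [ht1] at hB
                refine hstack _ _ hB ?_ ?_
                · simp [hrta, hrtb]
                · have h4 : 4 ^ (f0 + 2) = 4 * 4 ^ (f0 + 1) := by ring
                  have : 1 ≤ 4 ^ (f0 + 1) := Nat.one_le_pow _ _ (by omega)
                  omega
              · have hrta' : pvReady (PySem.Dict.mk gates) t a = false := by
                  rcases Bool.eq_false_or_eq_true (pvReady (PySem.Dict.mk gates) t a) with h' | h'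
                  · exact absurd h' hrta
                  · exact h'
                by_cases hrtb : pvReady (PySem.Dict.mk gates) t b = true
                · -- only a is missing
                  have hrb1 : pvReady (PySem.Dict.mk gates) t1 b = true :=
                    (pvTransport (PySem.Dict.mk gates) hpres1 hrtb).1
                  have ht2 : t2 = t1 := hrb2.2.2 hrb1
                  have hrev' : pvRunB (PySem.Dict.mk gates) (m + 1) (node :: rest) t1 = some d := by
                    rw [← ht2]; exact hrev
                  have hA := ih hf' a o (n0 + 1) ho hroa (by omega) t sa t1 h1 (node :: rest) (m + 1) d hrev'
                  refine hstack _ _ hA ?_ ?_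
                  · simp [hrta', hrtb]
                  · have h4 : 4 ^ (f0 + 2) = 4 * 4 ^ (f0 + 1) := by ring
                    have : 1 ≤ 4 ^ (f0 + 1) := Nat.one_le_pow _ _ (by omega)
                    omega
                · -- both missing
                  have hrtb' : pvReady (PySem.Dict.mk gates) t b = false := by
                    rcases Bool.eq_false_or_eq_true (pvReady (PySem.Dict.mk gates) t b) with h' | h'
                    · exact absurd h' hrtb
                    · exact h'
                  have hB := ih hf' b o (n0 + 1) ho hrob (by omega) t1 sb t2 h2 (node :: rest) (m + 1) d hrev
                  have hA := ih hf' a o (n0 + 1) ho hroa (by omega) t sa t1 h1 (b :: node :: rest) (m + 1 + 4 ^ (f0 + 1)) d hB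
                  refine hstack _ _ hA ?_ ?_
                  · simp [hrta', hrtb']
                  · have h4 : 4 ^ (f0 + 2) = 4 * 4 ^ (f0 + 1) := by ring
                    have : 1 ≤ 4 ^ (f0 + 1) := Nat.one_le_pow _ _ (by omega)
                    omega

-- ===== VERDICT (by name: the statement is the Claim_ definition above) =====
theorem pvCard_bound (gates : List (String × String × String × String)) (t : PySem.Dict String (List String)) (node : String) :
    (pvUnc gates gates.length t node).card ≤ gates.length := by
  calc (pvUnc gates gates.length t node).card
      ≤ (gates.map Prod.fst).toFinset.card := Finset.card_filter_le _ _
    _ ≤ (gates.map Prod.fst).length := (gates.map Prod.fst).toFinset_card_le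
    _ = gates.length := List.length_map ..

theorem build_gate_tree_spec : Claim_equal_build_gate_tree := by
  intro outputs gates hDom hPre
  unfold Spec_build_gate_tree build_gate_tree build_gate_tree_alt
  dsimp only []
  have key : ∀ (os : List String), (∀ x ∈ os, x ∈ outputs) → ∀ (t : PySem.Dict String (List String)),
      os.foldl (fun t o =>
          match pvBuildA (PySem.Dict.mk gates) (gates.length + 1) o t with
          | some (_, t') => t'
          | none => t) t
        = os.foldl (fun t o => (pvRunB (PySem.Dict.mk gates) (4 ^ (gates.length + 1)) [o] t).getD t) t := by
    intro os
    induction os with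
    | nil => intro _ t; rfl
    | cons o os ihos =>
      intro hos t
      rw [List.foldl_cons, List.foldl_cons]
      have ho : o ∈ outputs := hos o (List.mem_cons_self ..)
      have hr0 : pvReach (PySem.Dict.mk gates) 0 o o = true := by simp [pvReach]
      have hsome : (pvBuildA (PySem.Dict.mk gates) (gates.length + 1) o t).isSome = true :=
        pvBuildA_total outputs gates hPre gates.length t o o 0 ho hr0 (by omega) (by omega)
          (pvCard_bound gates t o)
      obtain ⟨⟨s, t'⟩, hst⟩ := Option.isSome_iff_exists.mp hsome
      have hrun0 : pvRunB (PySem.Dict.mk gates) 0 ([] : List String) t' = some t' := by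
        simp [pvRunB]
      have hsim := pvSim outputs gates hPre (gates.length + 1) (by omega) o o 0 ho hr0 (by omega) t s t' hst [] 0 t' hrun0
      rw [zero_add] at hsim
      rw [hst, hsim]
      dsimp only [Option.getD]
      exact ihos (fun x hx => hos x (List.mem_cons_of_mem _ hx)) t'
  rw [key outputs (fun x hx => hx) PySem.Dict.empty]
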